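-- pv_equiv track=rewrite | github.com/SarahYoung15Gifts/python_daily_challenges | day_9_golden_package/golden_package.py | inspect_packages
-- ===== SOURCE A (Python) =====
-- def inspect_packages(items):
-- 	messages = []
-- 	for package in items:
-- 		if package == "Golden":
-- 			messages.append("Found the Golden Package!")
-- 			break
-- 		if package == "Fragile":
-- 			messages.append("Skipping fragile package...")
-- 			continue
-- 		messages.append("Checking standard package...")
-- 	return messages
-- ===== SOURCE B (Python) =====
-- def inspect_packages(items):
--     items = list(items)
--     try:
--         cut = items.index("Golden")
--         golden = True
--     except ValueError:
--         cut = len(items)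
--         golden = False
--     messages = ["Skipping fragile package..." if p == "Fragile"
--                 else "Checking standard package..."
--                 for p in items[:cut]]
--     if golden:
--         messages.append("Found the Golden Package!")
--     return messages
-- ===== Notes on version B (the rewrite author's own statement) =====
-- stated objective: alternative
-- what changed: Replaced the single branchy scan with break/continue by a two-phase decomposition: first locate the Golden boundary with list.index, then map the prefix to messages with a comprehension and append the Golden message if found.
import Mathlib
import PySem

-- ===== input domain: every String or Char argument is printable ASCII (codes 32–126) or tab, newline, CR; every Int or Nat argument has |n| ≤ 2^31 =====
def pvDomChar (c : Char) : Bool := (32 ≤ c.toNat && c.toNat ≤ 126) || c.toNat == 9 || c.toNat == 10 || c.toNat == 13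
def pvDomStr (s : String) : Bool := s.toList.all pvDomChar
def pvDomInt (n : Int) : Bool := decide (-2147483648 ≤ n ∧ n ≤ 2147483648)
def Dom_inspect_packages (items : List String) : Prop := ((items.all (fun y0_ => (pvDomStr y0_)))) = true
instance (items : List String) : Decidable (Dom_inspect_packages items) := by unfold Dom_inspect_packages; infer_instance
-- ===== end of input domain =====

-- B replaces A's break/continue scan by a boundary-finding pass (index of "Golden") plus a map over the prefix; same cost, different decomposition.


-- ===== PORT A =====
-- literal transliteration of A's loop with break/continue as structural recursion
def inspect_packages (items : List String) : List String :=
  match items with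
  | [] => []
  | package :: rest =>
    if package = "Golden" then ["Found the Golden Package!"]
    else if package = "Fragile" then "Skipping fragile package..." :: inspect_packages rest
    else "Checking standard package..." :: inspect_packages rest

-- ===== PORT B =====
def inspect_packages_alt (items : List String) : List String :=
  match PySem.List.index? items "Golden" with
  | some cut =>
      ((items.take cut).map (fun p => if p = "Fragile" then "Skipping fragile package..." else "Checking standard package..."))
        ++ ["Found the Golden Package!"]
  | none =>
      items.map (fun p => if p = "Fragile" then "Skipping fragile package..." else "Checking standard package...")

-- ===== PRECONDITION & SPEC =====
def Spec_inspect_packages (items : List String) (out : List String) : Prop := out = inspect_packages_alt items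
instance (items : List String) (out : List String) : Decidable (Spec_inspect_packages items out) := by unfold Spec_inspect_packages; infer_instance

-- ===== CLAIM (what is proved, stated in full; the proofs are below) =====
def Claim_equal_inspect_packages : Prop := ∀ (items : List String), Dom_inspect_packages items → Spec_inspect_packages items (inspect_packages items)

-- ===== LEMMAS AND PROOFS =====
theorem inspect_packages_eq (items : List String) :
    inspect_packages items = inspect_packages_alt items := by
  induction items with
  | nil => rfl
  | cons p rest ih =>
    by_cases hg : p = "Golden"
    · subst hg
      unfold inspect_packages inspect_packages_alt
      rw [PySem.List.index?_cons_self _ _]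
      simp
    · have hidx : PySem.List.index? (p :: rest) "Golden" =
        (PySem.List.index? rest "Golden").map (· + 1) :=
        PySem.List.index?_cons_of_ne rest hg
      unfold inspect_packages inspect_packages_alt
      rw [hidx]
      cases h : PySem.List.index? rest "Golden" with
      | none =>
        simp only [Option.map_none]
        have := ih
        unfold inspect_packages_alt at this
        rw [h] at this
        simp [hg, this]
        by_cases hf : p = "Fragile" <;> simp [hf]
      | some k =>
        simp only [Option.map_some]
        have := ih
        unfold inspect_packages_alt at this
        rw [h] at this
        simp [hg, this, List.take_succ_cons]
        by_cases hf : p = "Fragile" <;> simp [hf]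

-- ===== VERDICT (by name: the statement is the Claim_ definition above) =====
theorem inspect_packages_spec : Claim_equal_inspect_packages := by
  intro items _
  exact inspect_packages_eq items
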